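-- pv_equiv track=rewrite | github.com/ett02/AI_Corso_Magistrale | zola_competition/wisePlayerOptimized.py | order_moves
-- ===== SOURCE A (Python) =====
-- def order_moves(moves):
--     """
--     Move Ordering ottimizzato (complessità lineare O(N) invece di O(N log N)).
--     Divide le mosse mettendo immediatamente in testa quelle di cattura,
--     evitando l'uso della funzione `sorted` e del calcolo costoso delle distanze.
--     """
--     captures = []
--     others = []
--     for m in moves:
--         if m[2]:  # m[2] è una cattura
--             captures.append(m)
--         else:
--             others.append(m)
--
--     return captures + others
-- ===== SOURCE B (Python) =====
-- def order_moves(moves):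
--     # Stable sort on a boolean key: captures (key False) first, original
--     # relative order preserved within each group.
--     return sorted(moves, key=lambda m: not m[2])
-- ===== Notes on version B (the rewrite author's own statement) =====
-- stated objective: idiomatic
-- what changed: Replaced the two accumulator lists and explicit loop with a single stable sort on the boolean key 'not m[2]', so captures precede the rest while intra-group order is preserved by stability.
import Mathlib
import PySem

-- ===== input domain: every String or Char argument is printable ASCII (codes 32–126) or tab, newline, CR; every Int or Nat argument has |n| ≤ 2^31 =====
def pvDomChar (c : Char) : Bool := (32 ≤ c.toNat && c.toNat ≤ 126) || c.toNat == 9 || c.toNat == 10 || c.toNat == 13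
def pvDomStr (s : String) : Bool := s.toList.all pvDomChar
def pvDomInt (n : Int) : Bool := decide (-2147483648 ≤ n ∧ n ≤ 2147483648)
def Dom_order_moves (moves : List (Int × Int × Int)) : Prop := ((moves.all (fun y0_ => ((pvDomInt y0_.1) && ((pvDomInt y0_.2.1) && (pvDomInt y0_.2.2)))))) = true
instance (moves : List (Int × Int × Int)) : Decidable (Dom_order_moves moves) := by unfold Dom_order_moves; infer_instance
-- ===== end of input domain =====

-- B replaces A's two accumulator lists and loop with a single stable sort on the boolean key "not m[2]" (idiomatic).


-- ===== PORT A =====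
-- loop with the two accumulator lists (captures, others), then captures ++ others
def order_moves (moves : List (Int × Int × Int)) : List (Int × Int × Int) :=
  let p := moves.foldl
    (fun (acc : List (Int × Int × Int) × List (Int × Int × Int)) m =>
      if m.2.2 ≠ 0 then (acc.1 ++ [m], acc.2) else (acc.1, acc.2 ++ [m]))
    ([], [])
  p.1 ++ p.2

-- ===== PORT B =====
-- key: "not m[2]"  (Python bool; False < True)
def order_moves_alt (moves : List (Int × Int × Int)) : List (Int × Int × Int) :=
  PySem.List.sorted moves (fun m => (m.2.2 == 0 : Bool)) false

-- ===== PRECONDITION & SPEC =====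
def Spec_order_moves (moves : List (Int × Int × Int)) (out : List (Int × Int × Int)) : Prop := out = order_moves_alt moves
instance (moves : List (Int × Int × Int)) (out : List (Int × Int × Int)) : Decidable (Spec_order_moves moves out) := by unfold Spec_order_moves; infer_instance

-- ===== CLAIM (what is proved, stated in full; the proofs are below) =====
def Claim_equal_order_moves : Prop := ∀ (moves : List (Int × Int × Int)), Dom_order_moves moves → Spec_order_moves moves (order_moves moves)

-- ===== LEMMAS AND PROOFS =====

-- the key and the "comes strictly before" test of order_moves_alt's insertion sort
def pvKey (m : Int × Int × Int) : Bool := (m.2.2 == 0 : Bool)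
def pvBefore (a b : Int × Int × Int) : Bool := decide (pvKey a < pvKey b)

lemma pvBefore_iff (a b : Int × Int × Int) :
    pvBefore a b = true ↔ (pvKey a = false ∧ pvKey b = true) := by
  simp [pvBefore, Bool.lt_iff]

lemma insertBy_append_last (x : Int × Int × Int) (l : List (Int × Int × Int))
    (h : ∀ y ∈ l, pvBefore x y = false) :
    PySem.List.insertBy pvBefore x l = l ++ [x] := by
  induction l with
  | nil => simp [PySem.List.insertBy]
  | cons y ys ih =>
    have hy := h y (by simp)
    simp [PySem.List.insertBy, hy, ih (fun z hz => h z (by simp [hz]))]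

lemma insertBy_mid (x : Int × Int × Int) (C : List (Int × Int × Int))
    (O : List (Int × Int × Int))
    (hC : ∀ c ∈ C, pvBefore x c = false)
    (hO : ∀ o ∈ O, pvBefore x o = true) :
    PySem.List.insertBy pvBefore x (C ++ O) = C ++ x :: O := by
  induction C with
  | nil =>
    cases O with
    | nil => simp [PySem.List.insertBy]
    | cons o os => simp [PySem.List.insertBy, hO o (by simp)]
  | cons c cs ih =>
    have hc := hC c (by simp)
    simp [PySem.List.insertBy, hc]
    exact ih (fun z hz => hC z (by simp [hz]))

-- invariant of the insertion-sort fold: captures stay in front, others behind,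
-- each group in arrival order
lemma sort_invariant (ys : List (Int × Int × Int)) :
    ∀ (C O : List (Int × Int × Int)),
      (∀ c ∈ C, pvKey c = false) → (∀ o ∈ O, pvKey o = true) →
      ys.foldl (fun acc x => PySem.List.insertBy pvBefore x acc) (C ++ O)
        = (C ++ ys.filter (fun m => !(pvKey m))) ++ (O ++ ys.filter (fun m => pvKey m)) := by
  induction ys with
  | nil => intro C O _ _; simp
  | cons x xs ih =>
    intro C O hC hO
    by_cases hx : pvKey x = true
    · have hstep : PySem.List.insertBy pvBefore x (C ++ O) = C ++ (O ++ [x]) := by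
        rw [← List.append_assoc]
        apply insertBy_append_last
        intro y hy
        rcases List.mem_append.mp hy with h | h
        · by_contra hb
          exact absurd ((pvBefore_iff x y).mp (by revert hb; cases pvBefore x y <;> simp)).1
            (by simp [hx])
        · by_contra hb
          exact absurd ((pvBefore_iff x y).mp (by revert hb; cases pvBefore x y <;> simp)).1
            (by simp [hx])
      have := ih C (O ++ [x]) hC (by
        intro o ho; rcases List.mem_append.mp ho with h | h
        · exact hO o h
        · simp at h; subst h; exact hx)
      simp only [List.foldl_cons, hstep, this, List.filter_cons]
      simp [hx]
    · have hx' : pvKey x = false := by revert hx; cases pvKey x <;> simp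
      have hstep : PySem.List.insertBy pvBefore x (C ++ O) = (C ++ [x]) ++ O := by
        rw [List.append_assoc]
        apply insertBy_mid
        · intro c hc
          by_contra hb
          exact absurd ((pvBefore_iff x c).mp (by revert hb; cases pvBefore x c <;> simp)).2
            (by simp [hC c hc])
        · intro o ho
          exact (pvBefore_iff x o).mpr ⟨hx', hO o ho⟩
      have := ih (C ++ [x]) O (by
        intro c hc; rcases List.mem_append.mp hc with h | h
        · exact hC c h
        · simp at h; subst h; exact hx') hO
      simp only [List.foldl_cons, hstep, this, List.filter_cons]
      simp [hx']

-- A's fold invariant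
lemma a_invariant (ys : List (Int × Int × Int)) :
    ∀ (C O : List (Int × Int × Int)),
      ys.foldl
        (fun (acc : List (Int × Int × Int) × List (Int × Int × Int)) m =>
          if m.2.2 ≠ 0 then (acc.1 ++ [m], acc.2) else (acc.1, acc.2 ++ [m]))
        (C, O)
        = (C ++ ys.filter (fun m => !(pvKey m)), O ++ ys.filter (fun m => pvKey m)) := by
  induction ys with
  | nil => intro C O; simp
  | cons x xs ih =>
    intro C O
    by_cases hx : x.2.2 = 0
    · have hk : pvKey x = true := by simp [pvKey, hx]
      simp only [List.foldl_cons, List.filter_cons, hk]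
      simpa [hx] using ih C (O ++ [x])
    · have hk : pvKey x = false := by simp [pvKey, hx]
      simp only [List.foldl_cons, List.filter_cons, hk]
      simpa [hx] using ih (C ++ [x]) O

-- ===== VERDICT (by name: the statement is the Claim_ definition above) =====
theorem order_moves_spec : Claim_equal_order_moves := by
  intro moves _
  unfold Spec_order_moves order_moves order_moves_alt
  have ha := a_invariant moves [] []
  have hb := sort_invariant moves [] [] (by simp) (by simp)
  simp only [List.nil_append] at ha hb
  simp only [PySem.List.sorted, if_neg (by simp : ¬ (false = true))]
  show ((moves.foldl _ ([], [])).1 ++ (moves.foldl _ ([], [])).2) = _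
  rw [ha]
  have : (fun acc x => PySem.List.insertBy pvBefore x acc)
      = (fun (acc : List (Int × Int × Int)) x =>
          PySem.List.insertBy (fun a b => decide ((a.2.2 == 0 : Bool) < (b.2.2 == 0 : Bool))) x acc) := by
    rfl
  rw [← this, hb]
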